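-- pv_equiv track=rewrite | github.com/jsheng0901/leetcode | OA/Amazon/maximize_total_area_of_rectangles.py | getMaxTotalArea
-- ===== SOURCE A (Python) =====
-- import heapq
-- from typing import List
--
-- def getMaxTotalArea(sideLengths: List[int]) -> int:
--     """
--     Time O(n * log(n) + n * log(n))
--     Space O(n)
--     先sort一下，保证遍历的时候从大到小找边长，每条边三种情况：
--     1. 可以和下一条边构成一对
--     2. 减1后可以和下一条边构成一对
--     3. 不能构成一对
--     找到所有能构成的边之后，放进大顶堆然后，再一次弹出计算最大面积和。
--     """
--     # 从大到小排列
--     sideLengths.sort(reverse=True)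
--     # 统计最长的边，大顶堆
--     max_heap = []
--     i = 0
--     max_area = 0
--     while i < len(sideLengths) - 1:
--         # 情况1，可以和下一条边构成一对
--         if sideLengths[i] == sideLengths[i + 1]:
--             heapq.heappush(max_heap, -sideLengths[i])
--             i += 2
--         # 情况2，减1后可以和下一条边构成一对
--         elif sideLengths[i] - sideLengths[i + 1] == 1:
--             heapq.heappush(max_heap, -(sideLengths[i] - 1))
--             i += 2
--         # 情况3，不能构成一对，跳过
--         else:
--             i += 1
--
--     # 依次弹出边长，计算面积和
--     while len(max_heap) >= 2:
--         first = heapq.heappop(max_heap)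
--         second = heapq.heappop(max_heap)
--         max_area += first * second
--
--     return max_area % (10 ** 9 + 7)
-- ===== SOURCE B (Python) =====
-- def getMaxTotalArea(sideLengths):
--     # one pass with a single pending partner instead of heap + drain phase
--     sideLengths.sort(reverse=True)
--     total = 0
--     pending = None
--     i = 0
--     n = len(sideLengths)
--     while i < n - 1:
--         a, b = sideLengths[i], sideLengths[i + 1]
--         if a == b:
--             v = a
--         elif a - b == 1:
--             v = a - 1
--         else:
--             i += 1
--             continue
--         if pending is None:
--             pending = v
--         else:
--             total += pending * v
--             pending = None
--         i += 2
--     return total % (10 ** 9 + 7)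
-- ===== Notes on version B (the rewrite author's own statement) =====
-- stated objective: simpler
-- what changed: Removes the max-heap and the separate drain phase: B pairs the produced side values in one pass with a single 'pending' partner variable (valid because after the descending sort the produced values are already non-increasing, so the heap drain pops them in production order).
import Mathlib
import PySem

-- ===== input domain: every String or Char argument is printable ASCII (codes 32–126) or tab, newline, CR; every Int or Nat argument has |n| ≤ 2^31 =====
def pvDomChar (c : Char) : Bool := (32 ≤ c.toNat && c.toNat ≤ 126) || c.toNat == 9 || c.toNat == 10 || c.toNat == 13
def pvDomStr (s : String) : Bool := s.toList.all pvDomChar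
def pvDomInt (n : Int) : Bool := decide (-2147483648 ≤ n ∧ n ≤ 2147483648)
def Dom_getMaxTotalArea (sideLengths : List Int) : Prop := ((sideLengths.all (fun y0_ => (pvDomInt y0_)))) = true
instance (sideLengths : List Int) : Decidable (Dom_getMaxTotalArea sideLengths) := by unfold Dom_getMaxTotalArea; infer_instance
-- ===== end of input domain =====

-- B replaces A's max-heap + separate drain phase with a single pass keeping one pending
-- partner value (objective: simpler). Note: both Pythons sort the argument in place;
-- the equivalence proved here is about the return value.


-- ===== PORT A =====
-- A re-implements heapq on Int by an ascending ordered list (push = ordered insert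
-- after equal elements, pop = head): exact for heapq's observable pop order on ints
-- (pop always returns a minimal element, and equal ints are indistinguishable).
def pushHeap (heap : List Int) (x : Int) : List Int :=
  match heap with
  | [] => [x]
  | h :: t => if x < h then x :: h :: t else h :: pushHeap t x

def buildHeap (xs : List Int) (i : Nat) (heap : List Int) : List Int :=
  if _h : i + 1 < xs.length then
    if xs.getD i 0 = xs.getD (i + 1) 0 then
      buildHeap xs (i + 2) (pushHeap heap (-(xs.getD i 0)))
    else if xs.getD i 0 - xs.getD (i + 1) 0 = 1 then
      buildHeap xs (i + 2) (pushHeap heap (-(xs.getD i 0 - 1)))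
    else
      buildHeap xs (i + 1) heap
  else heap
termination_by xs.length - i

def drainHeap (heap : List Int) (acc : Int) : Int :=
  match heap with
  | a :: b :: t => drainHeap t (acc + a * b)
  | _ => acc

def getMaxTotalArea (sideLengths : List Int) : Int :=
  let s := PySem.List.sorted sideLengths (fun x => x) true
  PySem.Int.mod (drainHeap (buildHeap s 0 []) 0) (10 ^ 9 + 7)

-- ===== PORT B =====
def loopB (xs : List Int) (i : Nat) (pending : Option Int) (total : Int) : Int :=
  if _h : i + 1 < xs.length then
    if xs.getD i 0 = xs.getD (i + 1) 0 then
      match pending with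
      | none => loopB xs (i + 2) (some (xs.getD i 0)) total
      | some p => loopB xs (i + 2) none (total + p * xs.getD i 0)
    else if xs.getD i 0 - xs.getD (i + 1) 0 = 1 then
      match pending with
      | none => loopB xs (i + 2) (some (xs.getD i 0 - 1)) total
      | some p => loopB xs (i + 2) none (total + p * (xs.getD i 0 - 1))
    else
      loopB xs (i + 1) pending total
  else total
termination_by xs.length - i

def getMaxTotalArea_alt (sideLengths : List Int) : Int :=
  let s := PySem.List.sorted sideLengths (fun x => x) true
  PySem.Int.mod (loopB s 0 none 0) (10 ^ 9 + 7)

-- ===== PRECONDITION & SPEC =====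
def Spec_getMaxTotalArea (sideLengths : List Int) (out : Int) : Prop := out = getMaxTotalArea_alt sideLengths
instance (sideLengths : List Int) (out : Int) : Decidable (Spec_getMaxTotalArea sideLengths out) := by unfold Spec_getMaxTotalArea; infer_instance

-- ===== CLAIM (what is proved, stated in full; the proofs are below) =====
def Claim_equal_getMaxTotalArea : Prop := ∀ (sideLengths : List Int), Dom_getMaxTotalArea sideLengths → Spec_getMaxTotalArea sideLengths (getMaxTotalArea sideLengths)

-- ===== LEMMAS AND PROOFS =====

-- the sequence of paired side values produced along the scan, in production order
def pvals (xs : List Int) (i : Nat) : List Int :=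
  if _h : i + 1 < xs.length then
    if xs.getD i 0 = xs.getD (i + 1) 0 then
      xs.getD i 0 :: pvals xs (i + 2)
    else if xs.getD i 0 - xs.getD (i + 1) 0 = 1 then
      (xs.getD i 0 - 1) :: pvals xs (i + 2)
    else
      pvals xs (i + 1)
  else []
termination_by xs.length - i

def pairSum (l : List Int) : Int :=
  match l with
  | a :: b :: t => a * b + pairSum t
  | _ => 0

theorem pushHeap_append (heap : List Int) (x : Int) (h : ∀ y ∈ heap, y ≤ x) :
    pushHeap heap x = heap ++ [x] := by
  induction heap with
  | nil => rfl
  | cons a t ih =>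
    have ha : a ≤ x := h a (by simp)
    simp [pushHeap, not_lt.mpr ha, ih (fun y hy => h y (by simp [hy]))]

theorem pvals_mem_lt {xs : List Int} {i : Nat} {v : Int} (hv : v ∈ pvals xs i) :
    i + 1 < xs.length := by
  fun_induction pvals xs i with
  | case1 i h h1 ih => exact h
  | case2 i h h1 h2 ih => exact h
  | case3 i h h1 h2 ih => exact Nat.lt_of_le_of_lt (by omega) (ih hv)
  | case4 i h => simp at hv

theorem pvals_bound {xs : List Int} (hmono : ∀ p q : Nat, p ≤ q → q < xs.length →
      xs.getD q 0 ≤ xs.getD p 0) :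
    ∀ i, ∀ v ∈ pvals xs i, v ≤ xs.getD i 0 := by
  intro i
  fun_induction pvals xs i with
  | case1 i h h1 ih =>
    intro v hv
    rcases List.mem_cons.mp hv with rfl | hv'
    · exact le_refl _
    · have hlt := pvals_mem_lt hv'
      exact le_trans (ih v hv') (hmono i (i + 2) (by omega) (by omega))
  | case2 i h h1 h2 ih =>
    intro v hv
    rcases List.mem_cons.mp hv with rfl | hv'
    · omega
    · have hlt := pvals_mem_lt hv'
      have := le_trans (ih v hv') (hmono i (i + 2) (by omega) (by omega))
      omega
  | case3 i h h1 h2 ih =>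
    intro v hv
    have hlt := pvals_mem_lt hv
    exact le_trans (ih v hv) (hmono i (i + 1) (by omega) (by omega))
  | case4 i h => intro v hv; exact absurd hv (by simp)

theorem buildHeap_eq {xs : List Int}
    (hmono : ∀ p q : Nat, p ≤ q → q < xs.length → xs.getD q 0 ≤ xs.getD p 0) :
    ∀ i heap, (∀ y ∈ heap, ∀ v ∈ pvals xs i, y ≤ -v) →
    buildHeap xs i heap = heap ++ (pvals xs i).map (fun v => -v) := by
  intro i heap
  fun_induction buildHeap xs i heap with
  | case1 i heap h h1 ih =>
    intro hheap
    have hpv : pvals xs i = xs.getD i 0 :: pvals xs (i + 2) := by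
      rw [pvals.eq_def, dif_pos h, if_pos h1]
    have hpush : pushHeap heap (-(xs.getD i 0)) = heap ++ [-(xs.getD i 0)] := by
      refine pushHeap_append _ _ (fun y hy => ?_)
      exact hheap y hy _ (by rw [hpv]; simp)
    have harg : ∀ y ∈ pushHeap heap (-(xs.getD i 0)), ∀ v ∈ pvals xs (i + 2), y ≤ -v := by
      rw [hpush]
      intro y hy v hv
      rcases List.mem_append.mp hy with hy' | hy'
      · exact hheap y hy' v (by rw [hpv]; exact List.mem_cons_of_mem _ hv)
      · have hy0 : y = -(xs.getD i 0) := by simpa using hy'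
        subst hy0
        have hlt := pvals_mem_lt hv
        have := le_trans (pvals_bound hmono (i + 2) v hv)
          (hmono i (i + 2) (by omega) (by omega))
        omega
    rw [ih harg, hpush, hpv]
    simp
  | case2 i heap h h1 h2 ih =>
    intro hheap
    have hpv : pvals xs i = (xs.getD i 0 - 1) :: pvals xs (i + 2) := by
      rw [pvals.eq_def, dif_pos h, if_neg h1, if_pos h2]
    have hpush : pushHeap heap (-(xs.getD i 0 - 1)) = heap ++ [-(xs.getD i 0 - 1)] := by
      refine pushHeap_append _ _ (fun y hy => ?_)
      exact hheap y hy _ (by rw [hpv]; simp)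
    have harg : ∀ y ∈ pushHeap heap (-(xs.getD i 0 - 1)), ∀ v ∈ pvals xs (i + 2), y ≤ -v := by
      rw [hpush]
      intro y hy v hv
      rcases List.mem_append.mp hy with hy' | hy'
      · exact hheap y hy' v (by rw [hpv]; exact List.mem_cons_of_mem _ hv)
      · have hy0 : y = -(xs.getD i 0 - 1) := by simpa using hy'
        subst hy0
        have hlt := pvals_mem_lt hv
        have := le_trans (pvals_bound hmono (i + 2) v hv)
          (hmono (i + 1) (i + 2) (by omega) (by omega))
        omega
    rw [ih harg, hpush, hpv]
    simp
  | case3 i heap h h1 h2 ih =>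
    intro hheap
    have hpv : pvals xs i = pvals xs (i + 1) := by
      rw [pvals.eq_def, dif_pos h, if_neg h1, if_neg h2]
    rw [ih (fun y hy v hv => hheap y hy v (by rw [hpv]; exact hv)), hpv]
  | case4 i heap h =>
    intro _
    have hpv : pvals xs i = [] := by rw [pvals.eq_def, dif_neg h]
    rw [hpv]
    simp

theorem drainHeap_map_neg : ∀ (l : List Int) (acc : Int),
    drainHeap (l.map (fun v => -v)) acc = acc + pairSum l
  | [], acc => by simp [drainHeap, pairSum]
  | [a], acc => by simp [drainHeap, pairSum]
  | a :: b :: t, acc => by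
    simp only [List.map, drainHeap, pairSum]
    rw [drainHeap_map_neg t]
    ring

theorem loopB_eq (xs : List Int) :
    ∀ i pending total, loopB xs i pending total =
      total + pairSum (pending.toList ++ pvals xs i) := by
  intro i
  fun_induction pvals xs i with
  | case1 i h h1 ih =>
    intro pending total
    match pending with
    | none =>
      rw [loopB.eq_def]; simp only [h, reduceDIte, if_pos h1, ih (some (xs.getD i 0)) total]
      simp
    | some p =>
      rw [loopB.eq_def]; simp only [h, reduceDIte, if_pos h1, ih none (total + p * xs.getD i 0)]
      simp [pairSum]; ring
  | case2 i h h1 h2 ih =>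
    intro pending total
    match pending with
    | none =>
      rw [loopB.eq_def]; simp only [h, reduceDIte, if_neg h1, if_pos h2, ih (some (xs.getD i 0 - 1)) total]
      simp
    | some p =>
      rw [loopB.eq_def]; simp only [h, reduceDIte, if_neg h1, if_pos h2, ih none (total + p * (xs.getD i 0 - 1))]
      simp [pairSum]; ring
  | case3 i h h1 h2 ih =>
    intro pending total
    rw [loopB.eq_def]; simp only [h, reduceDIte, if_neg h1, if_neg h2, ih pending total]
  | case4 i h =>
    intro pending total
    rw [loopB.eq_def]; simp only [h, reduceDIte]
    match pending with
    | none => simp [pairSum]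
    | some p => simp [pairSum]

theorem sorted_rev_mono (xs : List Int) :
    ∀ p q : Nat, p ≤ q → q < (PySem.List.sorted xs (fun x => x) true).length →
      (PySem.List.sorted xs (fun x => x) true).getD q 0 ≤
      (PySem.List.sorted xs (fun x => x) true).getD p 0 := by
  intro p q hpq hq
  have hp : p < (PySem.List.sorted xs (fun x => x) true).length := by omega
  rw [List.getD_eq_getElem _ _ hq, List.getD_eq_getElem _ _ hp]
  rcases Nat.eq_or_lt_of_le hpq with rfl | hlt
  · exact le_refl _
  · have := (List.pairwise_iff_getElem.mp
      (PySem.List.sorted_pairwise_rev xs (fun x => x))) p q hp hq hlt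
    exact this

-- ===== VERDICT (by name: the statement is the Claim_ definition above) =====
theorem getMaxTotalArea_spec : Claim_equal_getMaxTotalArea := by
  intro sideLengths _
  unfold Spec_getMaxTotalArea getMaxTotalArea getMaxTotalArea_alt
  show PySem.Int.mod
      (drainHeap (buildHeap (PySem.List.sorted sideLengths (fun x => x) true) 0 []) 0) (10 ^ 9 + 7)
    = PySem.Int.mod (loopB (PySem.List.sorted sideLengths (fun x => x) true) 0 none 0) (10 ^ 9 + 7)
  rw [buildHeap_eq (sorted_rev_mono sideLengths) 0 [] (by simp), loopB_eq]
  simp [drainHeap_map_neg]
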